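-- pv_equiv track=rewrite | github.com/zzflux/ProjectEuler | Euler328-LCSearch.py | worstCaseCost
-- ===== SOURCE A (Python) =====
-- def worstCaseCost(rmin, rmax, alreadyChecked = {}):
--     rangelen =  rmax - rmin + 1
--     if rangelen == 1:
--         return 0
--     if rangelen == 2:
--         return rmin
--     elif rangelen == 3:
--         return (rmax + rmin) // 2
--     else:
--         if (rmin, rmax) in alreadyChecked:
--             return alreadyChecked[(rmin, rmax)]
--         else:
--             toret = min(part + max(worstCaseCost(rmin, part - 1), worstCaseCost(part + 1, rmax)) for part in range(rmin + 1, rmax))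
--             alreadyChecked[(rmin, rmax)] = toret
--             return toret
-- ===== SOURCE B (Python) =====
-- # B: iterative bottom-up interval DP (explicit table over growing interval
-- # lengths) instead of A's top-down memoized recursion; same return values.
-- # Note: A's recursive calls use the shared mutable DEFAULT dict, so the
-- # passed-in alreadyChecked is only ever consulted for the top-level pair.
-- # A also mutates that dict (memoization); B does not — the equivalence
-- # claimed is about the return value only.
-- def worstCaseCost(rmin, rmax, alreadyChecked={}):
--     n = rmax - rmin + 1
--     if n == 1:
--         return 0
--     if n == 2:
--         return rmin
--     if n == 3:
--         return (rmax + rmin) // 2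
--     if (rmin, rmax) in alreadyChecked:
--         return alreadyChecked[(rmin, rmax)]
--
--     best = {}
--
--     def val(i, j):
--         length = j - i + 1
--         if length == 1:
--             return 0
--         if length == 2:
--             return i
--         if length == 3:
--             return (j + i) // 2
--         return best[(i, j)]
--
--     for length in range(4, n + 1):
--         for i in range(rmin, rmax - length + 2):
--             j = i + length - 1
--             best[(i, j)] = min(p + max(val(i, p - 1), val(p + 1, j))
--                                for p in range(i + 1, j))
--     return best[(rmin, rmax)]
-- ===== Notes on version B (the rewrite author's own statement) =====
-- stated objective: alternative
-- what changed: Replaces A's top-down recursion memoized in Python's shared mutable default dict with an explicit bottom-up interval DP that fills a table of costs by increasing interval length; the passed-in alreadyChecked dict is (as in A, whose recursive calls never forward it) consulted only for the top-level pair, and B does not mutate it.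
import Mathlib
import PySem

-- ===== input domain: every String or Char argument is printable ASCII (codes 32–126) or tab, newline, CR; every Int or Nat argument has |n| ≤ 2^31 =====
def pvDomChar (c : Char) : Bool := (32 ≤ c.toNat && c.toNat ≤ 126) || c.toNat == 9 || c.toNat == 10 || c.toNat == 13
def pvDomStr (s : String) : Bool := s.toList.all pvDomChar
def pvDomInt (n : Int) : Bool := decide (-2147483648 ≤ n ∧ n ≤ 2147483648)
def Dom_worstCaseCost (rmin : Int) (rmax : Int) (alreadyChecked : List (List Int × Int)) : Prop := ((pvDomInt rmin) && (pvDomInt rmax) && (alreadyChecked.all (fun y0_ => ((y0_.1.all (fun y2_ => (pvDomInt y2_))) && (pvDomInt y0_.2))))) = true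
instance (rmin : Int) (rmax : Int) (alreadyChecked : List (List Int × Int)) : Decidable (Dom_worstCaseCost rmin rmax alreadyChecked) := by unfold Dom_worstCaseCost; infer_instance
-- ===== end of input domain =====

-- B replaces A's memoized top-down recursion by a bottom-up interval DP; equal return values
-- (A additionally MUTATES the alreadyChecked dict and its shared default dict — return-value equivalence only).

-- ===== PORT A =====
-- Python's recursive calls `worstCaseCost(rmin, part - 1)` pass NO dict: they all share the
-- mutable DEFAULT dict `{}` of the def line.  That default dict is modelled as threaded state
-- `d` starting empty at the top-level call: it only ever receives values the recursion itself
-- computed, so starting it empty is faithful to the returned value.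
-- `fuel` is a totality guard only; it always exceeds the recursion depth (rmax - rmin).
def wccARecF : Nat → Int → Int → Std.HashMap (Int × Int) Int → Int × Std.HashMap (Int × Int) Int
  | 0, _, _, d => (0, d)   -- unreachable: fuel exceeds the recursion depth
  | fuel+1, rmin, rmax, d =>
    let rangelen := rmax - rmin + 1
    if rangelen = 1 then (0, d)
    else if rangelen = 2 then (rmin, d)
    else if rangelen = 3 then (PySem.Int.floordiv (rmax + rmin) 2, d)
    else
      match d[(rmin, rmax)]? with
      | some v => (v, d)
      | none =>
        -- toret = min(part + max(…, …) for part in range(rmin+1, rmax)), evaluated left to right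
        let st := (PySem.List.pyRange (rmin + 1) rmax 1).foldl (fun acc part =>
          let r1 := wccARecF fuel rmin (part - 1) acc.2
          let r2 := wccARecF fuel (part + 1) rmax r1.2
          let cand := part + max r1.1 r2.1
          (some (match acc.1 with | none => cand | some m => min m cand), r2.2)) (none, d)
        let toret := st.1.getD 0   -- st.1 = none ↔ empty range: Python raises ValueError there (outside Pre_)
        (toret, st.2.insert (rmin, rmax) toret)

-- the same generator-min loop, as run by the top-level call (helper; same code as the inner fold)
def wccAMinF (fuel : Nat) (rmin rmax : Int) (d : Std.HashMap (Int × Int) Int) :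
    Option Int × Std.HashMap (Int × Int) Int :=
  (PySem.List.pyRange (rmin + 1) rmax 1).foldl (fun acc part =>
    let r1 := wccARecF fuel rmin (part - 1) acc.2
    let r2 := wccARecF fuel (part + 1) rmax r1.2
    let cand := part + max r1.1 r2.1
    (some (match acc.1 with | none => cand | some m => min m cand), r2.2)) (none, d)

def worstCaseCost (rmin : Int) (rmax : Int) (alreadyChecked : List (List Int × Int)) : Int :=
  let rangelen := rmax - rmin + 1
  if rangelen = 1 then 0
  else if rangelen = 2 then rmin
  else if rangelen = 3 then PySem.Int.floordiv (rmax + rmin) 2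
  else
    match (PySem.Dict.mk alreadyChecked).get? [rmin, rmax] with
    | some v => v
    | none =>
      -- A also writes toret into alreadyChecked (mutation; return value unaffected)
      ((wccAMinF (rmax - rmin).toNat rmin rmax (∅ : Std.HashMap (Int × Int) Int)).1).getD 0

-- ===== PORT B =====
-- the nested helper val(i, j) of Source B
def wccBVal (best : Std.HashMap (Int × Int) Int) (i j : Int) : Int :=
  let length := j - i + 1
  if length = 1 then 0
  else if length = 2 then i
  else if length = 3 then PySem.Int.floordiv (j + i) 2
  else ((best[(i, j)]?).getD 0)   -- Source B: best[(i, j)]; present for every lookup the loops perform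

-- body of the inner `for i in range(rmin, rmax - length + 2)` loop of Source B
def wccBStep (length : Int) (best : Std.HashMap (Int × Int) Int) (i : Int) :
    Std.HashMap (Int × Int) Int :=
  let j := i + length - 1
  best.insert (i, j)
    (((PySem.List.min? ((PySem.List.pyRange (i + 1) j 1).map
        (fun p => p + max (wccBVal best i (p - 1)) (wccBVal best (p + 1) j))) (fun x => x))).getD 0)
    -- min(...) of an empty generator never happens here (length ≥ 4); getD 0 is a totality guard

-- the two nested `for` loops of Source B, filling `best`
def wccBTable (rmin rmax n : Int) : Std.HashMap (Int × Int) Int :=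
  (PySem.List.pyRange 4 (n + 1) 1).foldl
    (fun best length => (PySem.List.pyRange rmin (rmax - length + 2) 1).foldl (wccBStep length) best)
    (∅ : Std.HashMap (Int × Int) Int)

def worstCaseCost_alt (rmin : Int) (rmax : Int) (alreadyChecked : List (List Int × Int)) : Int :=
  let n := rmax - rmin + 1
  if n = 1 then 0
  else if n = 2 then rmin
  else if n = 3 then PySem.Int.floordiv (rmax + rmin) 2
  else
    match (PySem.Dict.mk alreadyChecked).get? [rmin, rmax] with
    | some v => v
    | none =>
      ((wccBTable rmin rmax n)[(rmin, rmax)]?).getD 0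
      -- Source B: best[(rmin, rmax)]; a KeyError only when n ≤ 0, which is outside Pre_

-- ===== PRECONDITION & SPEC =====
-- A raises ValueError (min of an empty generator) exactly when the range is empty or negative
-- (rmax < rmin) AND the pair is not a key of alreadyChecked; Pre_ excludes exactly those inputs.
def Pre_worstCaseCost (rmin : Int) (rmax : Int) (alreadyChecked : List (List Int × Int)) : Prop :=
  rmin ≤ rmax ∨ (PySem.Dict.mk alreadyChecked).get? [rmin, rmax] ≠ none
instance (rmin : Int) (rmax : Int) (alreadyChecked : List (List Int × Int)) : Decidable (Pre_worstCaseCost rmin rmax alreadyChecked) := by unfold Pre_worstCaseCost; infer_instance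

def pvWitness_worstCaseCost : Int × Int × (List (List Int × Int)) := (0, 5, [])

def Spec_worstCaseCost (rmin : Int) (rmax : Int) (alreadyChecked : List (List Int × Int)) (out : Int) : Prop := out = worstCaseCost_alt rmin rmax alreadyChecked
instance (rmin : Int) (rmax : Int) (alreadyChecked : List (List Int × Int)) (out : Int) : Decidable (Spec_worstCaseCost rmin rmax alreadyChecked out) := by unfold Spec_worstCaseCost; infer_instance

-- ===== CLAIM (what is proved, stated in full; the proofs are below) =====
def Claim_equal_worstCaseCost : Prop := ∀ (rmin : Int) (rmax : Int) (alreadyChecked : List (List Int × Int)), Dom_worstCaseCost rmin rmax alreadyChecked → Pre_worstCaseCost rmin rmax alreadyChecked → Spec_worstCaseCost rmin rmax alreadyChecked (worstCaseCost rmin rmax alreadyChecked)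

-- ===== LEMMAS AND PROOFS =====

-- the pure worst-case cost, by fuel recursion (proof-only reference function)
def pvM (a : Option Int) (xs : List Int) : Option Int :=
  xs.foldl (fun a c => some (match a with | none => c | some m => min m c)) a

def pvCF : Nat → Int → Int → Int
  | 0, _, _ => 0
  | fuel+1, i, j =>
    if j - i + 1 = 1 then 0
    else if j - i + 1 = 2 then i
    else if j - i + 1 = 3 then PySem.Int.floordiv (j + i) 2
    else (pvM none ((PySem.List.pyRange (i + 1) j 1).map
      (fun p => p + max (pvCF fuel i (p - 1)) (pvCF fuel (p + 1) j)))).getD 0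

def pvC (i j : Int) : Int := pvCF ((j - i).toNat + 1) i j

def pvG (i j p : Int) : Int := p + max (pvC i (p - 1)) (pvC (p + 1) j)

lemma pvCF_stable : ∀ (f1 f2 : Nat) (i j : Int), (j - i).toNat < f1 → (j - i).toNat < f2 →
    pvCF f1 i j = pvCF f2 i j := by
  intro f1
  induction f1 with
  | zero => intro f2 i j h1 _; omega
  | succ f1 ih =>
    intro f2 i j h1 h2
    cases f2 with
    | zero => omega
    | succ f2 =>
      simp only [pvCF]
      split_ifs with e1 e2 e3
      · rfl
      · rfl
      · rfl
      · congr 1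
        apply congrArg
        apply List.map_congr_left
        intro p hp
        rw [PySem.List.mem_pyRange_one] at hp
        have hb1 : ((p - 1) - i).toNat < f1 := by omega
        have hb2 : (j - (p + 1)).toNat < f1 := by omega
        rw [ih f2 i (p - 1) hb1 (by omega), ih f2 (p + 1) j hb2 (by omega)]
  
lemma pvC_eq (i j : Int) : pvC i j =
    if j - i + 1 = 1 then 0
    else if j - i + 1 = 2 then i
    else if j - i + 1 = 3 then PySem.Int.floordiv (j + i) 2
    else (pvM none ((PySem.List.pyRange (i + 1) j 1).map (pvG i j))).getD 0 := by
  show pvCF ((j - i).toNat + 1) i j = _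
  simp only [pvCF]
  split_ifs with e1 e2 e3
  · rfl
  · rfl
  · rfl
  · congr 2
    apply List.map_congr_left
    intro p hp
    rw [PySem.List.mem_pyRange_one] at hp
    unfold pvG pvC
    rw [pvCF_stable ((j - i).toNat) (((p - 1) - i).toNat + 1) i (p - 1) (by omega) (by omega),
        pvCF_stable ((j - i).toNat) ((j - (p + 1)).toNat + 1) (p + 1) j (by omega) (by omega)]

lemma pvM_some (xs : List Int) : ∀ m : Int, pvM (some m) xs = some (xs.foldl min m) := by
  induction xs with
  | nil => intro m; rfl
  | cons x t ih => intro m; simpa [pvM, List.foldl] using ih (min m x)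

lemma pvM_none_getD (xs : List Int) :
    (pvM none xs).getD 0 = ((PySem.List.min? xs (fun x => x)).getD 0) := by
  cases xs with
  | nil => rfl
  | cons x t =>
    have h1 : pvM none (x :: t) = pvM (some x) t := rfl
    rw [h1, pvM_some, PySem.List.min?_id_cons]

-- invariant: the threaded default-dict only holds correct pure costs
def pvMemoOK (d : Std.HashMap (Int × Int) Int) : Prop :=
  ∀ i j v : Int, d[(i, j)]? = some v → v = pvC i j

lemma pvHMGetInsert (m : Std.HashMap (Int × Int) Int) (k k' : Int × Int) (v : Int) :
    (m.insert k v)[k']? = if k' = k then some v else m[k']? := by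
  rw [Std.HashMap.getElem?_insert]
  simp only [beq_iff_eq]
  by_cases h : k' = k
  · rw [if_pos h.symm, if_pos h]
  · rw [if_neg (fun hh => h hh.symm), if_neg h]

lemma pvMemoOK_empty : pvMemoOK (∅ : Std.HashMap (Int × Int) Int) := by
  intro i j v h
  simp at h

lemma pvMemoOK_insert (d : Std.HashMap (Int × Int) Int) (a b : Int) (h : pvMemoOK d) :
    pvMemoOK (d.insert (a, b) (pvC a b)) := by
  intro i j v hg
  rw [pvHMGetInsert] at hg
  split_ifs at hg with he
  · obtain ⟨rfl, rfl⟩ : i = a ∧ j = b := by simpa [Prod.ext_iff] using he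
    injection hg with h'
    exact h'.symm
  · exact h i j v hg

-- unfolding equations for wccARecF, one per branch
lemma wccARecF_br1 (fuel : Nat) (rmin rmax : Int) (d : Std.HashMap (Int × Int) Int)
    (h : rmax - rmin + 1 = 1) : wccARecF (fuel + 1) rmin rmax d = (0, d) := by
  simp [wccARecF, h]

lemma wccARecF_br2 (fuel : Nat) (rmin rmax : Int) (d : Std.HashMap (Int × Int) Int)
    (h : rmax - rmin + 1 = 2) : wccARecF (fuel + 1) rmin rmax d = (rmin, d) := by
  simp [wccARecF, h]

lemma wccARecF_br3 (fuel : Nat) (rmin rmax : Int) (d : Std.HashMap (Int × Int) Int)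
    (h : rmax - rmin + 1 = 3) : wccARecF (fuel + 1) rmin rmax d
      = (PySem.Int.floordiv (rmax + rmin) 2, d) := by
  simp [wccARecF, h]

lemma wccARecF_hit (fuel : Nat) (rmin rmax : Int) (d : Std.HashMap (Int × Int) Int) (v : Int)
    (h1 : ¬(rmax - rmin + 1 = 1)) (h2 : ¬(rmax - rmin + 1 = 2)) (h3 : ¬(rmax - rmin + 1 = 3))
    (hg : d[(rmin, rmax)]? = some v) : wccARecF (fuel + 1) rmin rmax d = (v, d) := by
  simp only [wccARecF]
  rw [if_neg h1, if_neg h2, if_neg h3, hg]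

lemma wccARecF_none (fuel : Nat) (rmin rmax : Int) (d : Std.HashMap (Int × Int) Int)
    (h1 : ¬(rmax - rmin + 1 = 1)) (h2 : ¬(rmax - rmin + 1 = 2)) (h3 : ¬(rmax - rmin + 1 = 3))
    (hg : d[(rmin, rmax)]? = none) : wccARecF (fuel + 1) rmin rmax d
      = (((wccAMinF fuel rmin rmax d).1).getD 0,
         (wccAMinF fuel rmin rmax d).2.insert (rmin, rmax) (((wccAMinF fuel rmin rmax d).1).getD 0)) := by
  simp only [wccARecF, wccAMinF]
  rw [if_neg h1, if_neg h2, if_neg h3, hg]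

-- the generator-min fold computes the running min of pure costs and keeps the memo correct
lemma pvFold_spec (fuel : Nat) (rmin rmax : Int)
    (hrec : ∀ a b : Int, (b - a).toNat < fuel → ∀ d, pvMemoOK d →
      (wccARecF fuel a b d).1 = pvC a b ∧ pvMemoOK (wccARecF fuel a b d).2) :
    ∀ (l : List Int), (∀ p ∈ l, rmin + 1 ≤ p ∧ p < rmax ∧
        ((p - 1) - rmin).toNat < fuel ∧ (rmax - (p + 1)).toNat < fuel) →
    ∀ (acc : Option Int) (d' : Std.HashMap (Int × Int) Int), pvMemoOK d' →
      (l.foldl (fun acc part =>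
        let r1 := wccARecF fuel rmin (part - 1) acc.2
        let r2 := wccARecF fuel (part + 1) rmax r1.2
        let cand := part + max r1.1 r2.1
        ((some (match acc.1 with | none => cand | some m => min m cand) : Option Int), r2.2)) (acc, d')).1
        = pvM acc (l.map (pvG rmin rmax)) ∧
      pvMemoOK (l.foldl (fun acc part =>
        let r1 := wccARecF fuel rmin (part - 1) acc.2
        let r2 := wccARecF fuel (part + 1) rmax r1.2
        let cand := part + max r1.1 r2.1
        ((some (match acc.1 with | none => cand | some m => min m cand) : Option Int), r2.2)) (acc, d')).2 := by
  intro l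
  induction l with
  | nil => intro _ acc d' hd'; exact ⟨rfl, hd'⟩
  | cons p t iht =>
    intro hb acc d' hd'
    obtain ⟨hp1, hp2, hp3, hp4⟩ := hb p (List.mem_cons_self ..)
    have h1 := hrec rmin (p - 1) hp3 d' hd'
    have h2 := hrec (p + 1) rmax hp4 (wccARecF fuel rmin (p - 1) d').2 h1.2
    simp only [List.foldl, List.map]
    have hstep : (p + max (wccARecF fuel rmin (p - 1) d').1
        (wccARecF fuel (p + 1) rmax (wccARecF fuel rmin (p - 1) d').2).1) = pvG rmin rmax p := by
      rw [h1.1, h2.1]; rfl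
    rw [show (pvM acc (pvG rmin rmax p :: t.map (pvG rmin rmax)))
          = pvM (some (match acc with | none => pvG rmin rmax p | some m => min m (pvG rmin rmax p))) (t.map (pvG rmin rmax)) from rfl]
    rw [← hstep]
    exact iht (fun q hq => hb q (List.mem_cons_of_mem _ hq)) _ _ h2.2

lemma wccAMinF_spec (fuel : Nat) (rmin rmax : Int)
    (hrec : ∀ a b : Int, (b - a).toNat < fuel → ∀ d, pvMemoOK d →
      (wccARecF fuel a b d).1 = pvC a b ∧ pvMemoOK (wccARecF fuel a b d).2)
    (hfit : ∀ p : Int, rmin + 1 ≤ p → p < rmax →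
      ((p - 1) - rmin).toNat < fuel ∧ (rmax - (p + 1)).toNat < fuel)
    (d : Std.HashMap (Int × Int) Int) (hd : pvMemoOK d) :
    (wccAMinF fuel rmin rmax d).1
      = pvM none ((PySem.List.pyRange (rmin + 1) rmax 1).map (pvG rmin rmax)) ∧
    pvMemoOK (wccAMinF fuel rmin rmax d).2 :=
  pvFold_spec fuel rmin rmax hrec (PySem.List.pyRange (rmin + 1) rmax 1)
    (fun p hp => by
      rw [PySem.List.mem_pyRange_one] at hp
      exact ⟨by omega, by omega, (hfit p (by omega) (by omega)).1, (hfit p (by omega) (by omega)).2⟩)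
    none d hd

-- A's recursion computes the pure cost and keeps the memo correct
lemma wccARecF_spec : ∀ (fuel : Nat) (rmin rmax : Int), (rmax - rmin).toNat < fuel →
    ∀ d, pvMemoOK d →
      (wccARecF fuel rmin rmax d).1 = pvC rmin rmax ∧ pvMemoOK (wccARecF fuel rmin rmax d).2 := by
  intro fuel
  induction fuel with
  | zero => intro rmin rmax h; omega
  | succ fuel ih =>
    intro rmin rmax hfuel d hd
    by_cases e1 : rmax - rmin + 1 = 1
    · rw [wccARecF_br1 fuel rmin rmax d e1]
      exact ⟨by rw [pvC_eq, if_pos e1], hd⟩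
    by_cases e2 : rmax - rmin + 1 = 2
    · rw [wccARecF_br2 fuel rmin rmax d e2]
      exact ⟨by rw [pvC_eq, if_neg e1, if_pos e2], hd⟩
    by_cases e3 : rmax - rmin + 1 = 3
    · rw [wccARecF_br3 fuel rmin rmax d e3]
      exact ⟨by rw [pvC_eq, if_neg e1, if_neg e2, if_pos e3], hd⟩
    cases hg : d[(rmin, rmax)]? with
    | some v =>
      rw [wccARecF_hit fuel rmin rmax d v e1 e2 e3 hg]
      exact ⟨(hd rmin rmax v hg), hd⟩
    | none =>
      rw [wccARecF_none fuel rmin rmax d e1 e2 e3 hg]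
      have hm := wccAMinF_spec fuel rmin rmax ih
        (fun p hq1 hq2 => ⟨by omega, by omega⟩) d hd
      have hCval : ((wccAMinF fuel rmin rmax d).1).getD 0 = pvC rmin rmax := by
        rw [hm.1, pvC_eq, if_neg e1, if_neg e2, if_neg e3]
      refine ⟨hCval, ?_⟩
      rw [hCval]
      exact pvMemoOK_insert _ rmin rmax hm.2

-- B-side invariant: all table entries up to the current loop position hold the pure cost
def pvInv (rmin rmax L cur : Int) (best : Std.HashMap (Int × Int) Int) : Prop :=
  ∀ i j : Int, rmin ≤ i → i + 3 ≤ j → j ≤ rmax →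
    (j - i + 1 < L ∨ (j - i + 1 = L ∧ i < cur)) → best[(i, j)]? = some (pvC i j)

lemma wccBVal_eq (rmin rmax L cur : Int) (best : Std.HashMap (Int × Int) Int)
    (hInv : pvInv rmin rmax L cur best) (i j : Int)
    (h1 : rmin ≤ i) (h2 : i ≤ j) (h3 : j ≤ rmax) (h4 : j - i + 1 < L) :
    wccBVal best i j = pvC i j := by
  simp only [wccBVal]
  split_ifs with e1 e2 e3
  · rw [pvC_eq, if_pos e1]
  · rw [pvC_eq, if_neg e1, if_pos e2]
  · rw [pvC_eq, if_neg e1, if_neg e2, if_pos e3]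
  · rw [hInv i j h1 (by omega) h3 (Or.inl h4)]
    rfl

lemma wccBStep_inv (rmin rmax L cur : Int) (best : Std.HashMap (Int × Int) Int)
    (hL : 4 ≤ L) (hc1 : rmin ≤ cur) (hc2 : cur + L - 1 ≤ rmax)
    (hInv : pvInv rmin rmax L cur best) :
    pvInv rmin rmax L (cur + 1) (wccBStep L best cur) := by
  have hval : (((PySem.List.min? ((PySem.List.pyRange (cur + 1) (cur + L - 1) 1).map
      (fun p => p + max (wccBVal best cur (p - 1)) (wccBVal best (p + 1) (cur + L - 1)))) (fun x => x))).getD 0)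
      = pvC cur (cur + L - 1) := by
    have hmap : ((PySem.List.pyRange (cur + 1) (cur + L - 1) 1).map
        (fun p => p + max (wccBVal best cur (p - 1)) (wccBVal best (p + 1) (cur + L - 1))))
        = ((PySem.List.pyRange (cur + 1) (cur + L - 1) 1).map (pvG cur (cur + L - 1))) := by
      apply List.map_congr_left
      intro p hp
      rw [PySem.List.mem_pyRange_one] at hp
      unfold pvG
      rw [wccBVal_eq rmin rmax L cur best hInv cur (p - 1) hc1 (by omega) (by omega) (by omega),
          wccBVal_eq rmin rmax L cur best hInv (p + 1) (cur + L - 1) (by omega) (by omega) (by omega) (by omega)]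
    rw [hmap, ← pvM_none_getD, pvC_eq]
    have e1 : ¬((cur + L - 1) - cur + 1 = 1) := by omega
    have e2 : ¬((cur + L - 1) - cur + 1 = 2) := by omega
    have e3 : ¬((cur + L - 1) - cur + 1 = 3) := by omega
    simp [e1, e2, e3]
  intro i j h1 h2 h3 hcond
  simp only [wccBStep]
  rw [pvHMGetInsert]
  split_ifs with he
  · obtain ⟨rfl, rfl⟩ : i = cur ∧ j = cur + L - 1 := by simpa [Prod.ext_iff] using he
    rw [hval]
  · apply hInv i j h1 h2 h3
    rcases hcond with h | ⟨hlen, hi⟩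
    · exact Or.inl h
    · refine Or.inr ⟨hlen, ?_⟩
      by_cases hic : i = cur
      · exfalso
        apply he
        subst hic
        have hj : j = i + L - 1 := by omega
        rw [hj]
      · omega

lemma pvInv_weaken (rmin rmax L cur cur' : Int) (best : Std.HashMap (Int × Int) Int)
    (h : cur' ≤ cur) (hInv : pvInv rmin rmax L cur best) : pvInv rmin rmax L cur' best := by
  intro i j h1 h2 h3 hc
  apply hInv i j h1 h2 h3
  rcases hc with h | ⟨hl, hi⟩
  · exact Or.inl h
  · exact Or.inr ⟨hl, by omega⟩

lemma innerB (rmin rmax L : Int) (hL : 4 ≤ L) :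
    ∀ (f : Nat) (cur : Int) (best : Std.HashMap (Int × Int) Int),
      ((rmax - L + 2) - cur).toNat ≤ f → rmin ≤ cur → pvInv rmin rmax L cur best →
      pvInv rmin rmax L (rmax - L + 2)
        ((PySem.List.pyRange cur (rmax - L + 2) 1).foldl (wccBStep L) best) := by
  intro f
  induction f with
  | zero =>
    intro cur best hf hc hInv
    rw [PySem.List.pyRange_one_eq_nil (by omega)]
    exact pvInv_weaken _ _ _ _ _ _ (by omega) hInv
  | succ f ihf =>
    intro cur best hf hc hInv
    by_cases hlt : cur < rmax - L + 2
    · rw [PySem.List.pyRange_one_cons hlt]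
      simp only [List.foldl]
      exact ihf (cur + 1) _ (by omega) (by omega)
        (wccBStep_inv rmin rmax L cur best hL hc (by omega) hInv)
    · rw [PySem.List.pyRange_one_eq_nil (by omega)]
      exact pvInv_weaken _ _ _ _ _ _ (by omega) hInv

lemma pvInv_succL (rmin rmax L : Int) (best : Std.HashMap (Int × Int) Int)
    (h : pvInv rmin rmax L (rmax - L + 2) best) : pvInv rmin rmax (L + 1) rmin best := by
  intro i j h1 h2 h3 hc
  apply h i j h1 h2 h3
  rcases hc with hlt | ⟨hl, hi⟩
  · rcases lt_or_eq_of_le (by omega : j - i + 1 ≤ L) with h' | h'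
    · exact Or.inl h'
    · exact Or.inr ⟨h', by omega⟩
  · omega

lemma outerB (rmin rmax : Int) (n : Int) :
    ∀ (f : Nat) (L : Int) (best : Std.HashMap (Int × Int) Int),
      ((n + 1) - L).toNat ≤ f → 4 ≤ L → pvInv rmin rmax L rmin best →
      pvInv rmin rmax (n + 1) rmin
        ((PySem.List.pyRange L (n + 1) 1).foldl
          (fun best length => (PySem.List.pyRange rmin (rmax - length + 2) 1).foldl (wccBStep length) best) best) := by
  intro f
  induction f with
  | zero =>
    intro L best hf hL hInv
    rw [PySem.List.pyRange_one_eq_nil (by omega)]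
    intro i j h1 h2 h3 hc
    apply hInv i j h1 h2 h3
    rcases hc with hlt | ⟨hl, hi⟩
    · exact Or.inl (by omega)
    · omega
  | succ f ihf =>
    intro L best hf hL hInv
    by_cases hlt : L < n + 1
    · rw [PySem.List.pyRange_one_cons hlt]
      simp only [List.foldl]
      refine ihf (L + 1) _ (by omega) (by omega) ?_
      exact pvInv_succL rmin rmax L _
        (innerB rmin rmax L hL (((rmax - L + 2) - rmin).toNat) rmin best le_rfl le_rfl hInv)
    · rw [PySem.List.pyRange_one_eq_nil (by omega)]
      intro i j h1 h2 h3 hc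
      apply hInv i j h1 h2 h3
      rcases hc with hlt' | ⟨hl, hi⟩
      · exact Or.inl (by omega)
      · omega

lemma wccBTable_get (rmin rmax : Int) (h4 : rmin + 3 ≤ rmax) :
    (wccBTable rmin rmax (rmax - rmin + 1))[(rmin, rmax)]? = some (pvC rmin rmax) := by
  have hInv0 : pvInv rmin rmax 4 rmin (∅ : Std.HashMap (Int × Int) Int) := by
    intro i j h1 h2 h3 hc
    rcases hc with h | ⟨_, hi⟩
    · omega
    · omega
  have := outerB rmin rmax (rmax - rmin + 1) (((rmax - rmin + 1 + 1) - 4).toNat) 4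
    (∅ : Std.HashMap (Int × Int) Int) le_rfl (by omega) hInv0
  exact this rmin rmax le_rfl (by omega) le_rfl (Or.inl (by omega))

-- ===== VERDICT (by name: the statement is the Claim_ definition above) =====
theorem worstCaseCost_spec : Claim_equal_worstCaseCost := by
  intro rmin rmax ac _ hPre
  unfold Spec_worstCaseCost worstCaseCost worstCaseCost_alt
  simp only
  split_ifs with e1 e2 e3
  · rfl
  · rfl
  · rfl
  · cases hg : (PySem.Dict.mk ac).get? [rmin, rmax] with
    | some v => rfl
    | none =>
      have hle : rmin ≤ rmax := by
        rcases hPre with h | h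
        · exact h
        · exact absurd hg h
      have h4 : rmin + 3 ≤ rmax := by omega
      show ((wccAMinF (rmax - rmin).toNat rmin rmax (∅ : Std.HashMap (Int × Int) Int)).1).getD 0
        = ((wccBTable rmin rmax (rmax - rmin + 1))[(rmin, rmax)]?).getD 0
      have hm := wccAMinF_spec ((rmax - rmin).toNat) rmin rmax
        (fun a b hb d hd => wccARecF_spec _ a b hb d hd)
        (fun p hq1 hq2 => ⟨by omega, by omega⟩) (∅ : Std.HashMap (Int × Int) Int) pvMemoOK_empty
      rw [hm.1, wccBTable_get rmin rmax h4]
      show (pvM none _).getD 0 = pvC rmin rmax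
      rw [pvC_eq, if_neg e1, if_neg e2, if_neg e3]
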